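-- pv_equiv track=rewrite | github.com/hildenost/advent-of-code | 07/haversacks.py | search_shiny_gold
-- ===== SOURCE A (Python) =====
-- def search_shiny_gold(visited, graph, bag):
--     if bag not in visited:
--         visited.add(bag)
--         if "shiny gold" in graph[bag]:
--             return True
--         if "no other" in graph[bag]:
--             return False
--
--         return any(
--             search_shiny_gold(visited, graph, children) for children in graph[bag]
--         )
--     return False
-- ===== SOURCE B (Python) =====
-- def search_shiny_gold(visited, graph, bag):
--     stack = [bag]
--     while stack:
--         node = stack.pop()
--         if node in visited:
--             continue
--         visited.add(node)
--         children = graph[node]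
--         if "shiny gold" in children:
--             return True
--         if "no other" in children:
--             continue
--         stack.extend(list(children)[::-1])
--     return False
-- ===== Notes on version B (the rewrite author's own statement) =====
-- stated objective: idiomatic
-- what changed: The recursive DFS with a lazy any() over children is replaced by an iterative DFS with an explicit stack (reverse-push of children preserves the left-to-right preorder, the visited set and the short-circuit on a direct 'shiny gold' hit).
-- outside the precondition, e.g. on search_shiny_gold(set(), {'a': ['b'], 'b': ['shiny gold'], 'c': ['zzz']}, 'a'): A returns True, B returns True
import Mathlib
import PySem

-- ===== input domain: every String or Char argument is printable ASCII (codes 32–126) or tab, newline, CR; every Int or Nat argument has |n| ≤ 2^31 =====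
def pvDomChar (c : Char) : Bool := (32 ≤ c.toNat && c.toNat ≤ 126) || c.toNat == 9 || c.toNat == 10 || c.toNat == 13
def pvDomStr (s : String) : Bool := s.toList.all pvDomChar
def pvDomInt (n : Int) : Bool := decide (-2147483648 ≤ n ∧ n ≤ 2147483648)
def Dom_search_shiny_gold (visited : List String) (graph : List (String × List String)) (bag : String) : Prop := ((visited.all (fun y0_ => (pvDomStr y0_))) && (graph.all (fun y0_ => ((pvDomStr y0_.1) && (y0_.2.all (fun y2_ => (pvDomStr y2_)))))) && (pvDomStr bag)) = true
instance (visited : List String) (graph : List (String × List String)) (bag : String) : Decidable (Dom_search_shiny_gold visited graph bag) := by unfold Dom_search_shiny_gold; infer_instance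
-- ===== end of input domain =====

-- A's recursive DFS vs B's explicit-stack DFS; the equivalence proved is about the RETURN
-- value (both Pythons mutate the 'visited' set in place, in the same order).

-- graph[x] on the dict: first-match lookup on the association list
def pvLookup : List (String × List String) → String → Option (List String)
  | [], _ => none
  | (k, vs) :: rest, x => if k == x then some vs else pvLookup rest x

-- termination measure for port B's loop: number of graph keys not yet visited
def pvM (graph : List (String × List String)) (v : List String) : Nat :=
  ((graph.map Prod.fst).filter (fun k => !(v.contains k))).length

-- the two facts port B's decreasing_by cites (self-contained proofs)
theorem pvM_add_eq_of_none (graph : List (String × List String)) (v : List String) (x : String)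
    (h : pvLookup graph x = none) : pvM graph (PySem.Set.add v x) = pvM graph v := by
  have hx' : x ∉ graph.map Prod.fst := by
    induction graph with
    | nil => simp
    | cons p rest ih =>
      obtain ⟨k, vs⟩ := p
      by_cases hk : (k == x) = true
      · rw [pvLookup, if_pos hk] at h
        exact absurd h (by simp)
      · rw [pvLookup, if_neg (by simpa using hk)] at h
        have hkx : ¬ (x = k) := fun e => by simp [e] at hk
        simp [ih h, hkx]
  unfold pvM
  congr 1
  apply List.filter_congr
  intro k hk
  have hkx : ¬ (k = x) := fun e => hx' (e ▸ hk)
  simp only [PySem.Set.add]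
  split
  · rfl
  · simp [hkx]

theorem pvM_add_lt_of_some (graph : List (String × List String)) (v : List String) (x : String)
    (l : List String) (hl : pvLookup graph x = some l) (hv : v.contains x = false) :
    pvM graph (PySem.Set.add v x) < pvM graph v := by
  have hxm : x ∉ v := by simpa using hv
  have hmem : x ∈ graph.map Prod.fst := by
    induction graph with
    | nil => simp [pvLookup] at hl
    | cons p rest ih =>
      obtain ⟨k, vs⟩ := p
      by_cases hk : (k == x) = true
      · have : k = x := by simpa using hk
        subst this
        simp
      · rw [pvLookup, if_neg (by simpa using hk)] at hl
        simpa using Or.inr (ih hl)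
  have hpq : ∀ b : String, (!(PySem.Set.add v x).contains b) = true → (!v.contains b) = true := by
    intro b hb
    simp only [Bool.not_eq_true'] at hb ⊢
    cases hvb : v.contains b
    · rfl
    · have hbm : b ∈ v := by simpa using hvb
      simp [PySem.Set.add, hxm, hbm] at hb
  have gmono : ∀ (p q : String → Bool), (∀ a, q a = true → p a = true) →
      ∀ t : List String, (t.filter q).length ≤ (t.filter p).length := by
    intro p q h t
    induction t with
    | nil => simp
    | cons a t2 ih =>
      by_cases hq : q a = true
      · simp [List.filter, hq, h a hq]
        omega
      · simp only [Bool.not_eq_true] at hq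
        cases hp : p a <;> simp [List.filter, hq, hp] <;> omega
  have gkey : ∀ (p q : String → Bool), (∀ a, q a = true → p a = true) →
      ∀ (L : List String), x ∈ L → p x = true → q x = false →
        (L.filter q).length < (L.filter p).length := by
    intro p q h L hL hpx hqx
    induction L with
    | nil => simp at hL
    | cons b t ih =>
      rcases List.mem_cons.mp hL with rfl | hmem'
      · have := gmono p q h t
        simp [List.filter, hpx, hqx]
        omega
      · have := ih hmem'
        by_cases hqb : q b = true
        · simp [List.filter, hqb, h b hqb]
          omega
        · simp only [Bool.not_eq_true] at hqb
          cases hpb : p b <;> simp [List.filter, hqb, hpb] <;> omega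
  unfold pvM
  exact gkey _ _ hpq (graph.map Prod.fst) hmem (by simpa using hv) (by simp [PySem.Set.add, hxm])

-- ===== PORT A =====
-- A's recursion is ported fuel-for-depth: each nested descent consumes one unit of fuel;
-- graph.length + 1 units provably never run out (each descent marks a fresh graph key
-- visited), so the fuel guard is only a totality device.
mutual
  -- the function body of A: visited check, add, graph[bag], the two sentinel tests, any(...)
  def pvSearchA (graph : List (String × List String)) :
      Nat → List String → String → Bool × List String
    | fuel, v, bag =>
      if v.contains bag then (false, v)
      else
        let v1 := PySem.Set.add v bag
        match pvLookup graph bag with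
        | none => (false, v1)  -- Python raises KeyError here; excluded by Pre_
        | some l =>
          if l.contains "shiny gold" then (true, v1)
          else if l.contains "no other" then (false, v1)
          else
            match fuel with
            | 0 => (false, v1)  -- never reached from search_shiny_gold's fuel
            | f + 1 => pvAnyA graph f v1 l
  termination_by fuel v bag => (fuel, 0)

  -- any(search_shiny_gold(...) for children in graph[bag]): lazy, stops at the first True
  def pvAnyA (graph : List (String × List String)) :
      Nat → List String → List String → Bool × List String
    | _, v, [] => (false, v)
    | fuel, v, c :: cs =>
      let r := pvSearchA graph fuel v c
      if r.1 then r else pvAnyA graph fuel r.2 cs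
  termination_by fuel v cs => (fuel, cs.length + 1)
end

def search_shiny_gold (visited : List String) (graph : List (String × List String)) (bag : String) : Bool :=
  (pvSearchA graph (graph.length + 1) visited bag).1

-- ===== PORT B =====
-- the while-loop of Source B: pop, skip visited, add, graph[node], sentinel tests,
-- push reversed(children) (head of the list = top of the stack, so the new stack is l ++ rest)
def pvLoopB (graph : List (String × List String)) (v : List String) (stack : List String) : Bool :=
  match stack with
  | [] => false
  | node :: rest =>
    if hn : v.contains node then pvLoopB graph v rest
    else
      match hl : pvLookup graph node with
      | none => pvLoopB graph (PySem.Set.add v node) rest  -- Python raises KeyError here; excluded by Pre_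
      | some l =>
        if l.contains "shiny gold" then true
        else if l.contains "no other" then pvLoopB graph (PySem.Set.add v node) rest
        else pvLoopB graph (PySem.Set.add v node) (l ++ rest)
termination_by (pvM graph v, stack.length)
decreasing_by
  · exact Prod.Lex.right _ (Nat.lt_succ_self _)
  · rw [pvM_add_eq_of_none graph v node hl]
    exact Prod.Lex.right _ (Nat.lt_succ_self _)
  · exact Prod.Lex.left _ _ (pvM_add_lt_of_some graph v node _ hl (by simpa using hn))
  · exact Prod.Lex.left _ _ (pvM_add_lt_of_some graph v node _ hl (by simpa using hn))

def search_shiny_gold_alt (visited : List String) (graph : List (String × List String)) (bag : String) : Bool :=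
  pvLoopB graph visited [bag]

-- ===== PRECONDITION & SPEC =====
-- Pre_ excludes the inputs on which Python A raises KeyError (a reached bag that is not a
-- graph key): it requires bag to be visited or a key, and every entry's children to be
-- sentinel-guarded, visited or keys; this is conservative — it also excludes some graphs
-- whose offending entries are unreachable from bag (A returns there; see the cite).
def Pre_search_shiny_gold (visited : List String) (graph : List (String × List String)) (bag : String) : Prop :=
  visited.contains bag = true ∨
  ((graph.map Prod.fst).contains bag = true ∧
   ∀ p ∈ graph, p.2.contains "shiny gold" = true ∨ p.2.contains "no other" = true ∨
     ∀ c ∈ p.2, visited.contains c = true ∨ (graph.map Prod.fst).contains c = true)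
instance (visited : List String) (graph : List (String × List String)) (bag : String) : Decidable (Pre_search_shiny_gold visited graph bag) := by unfold Pre_search_shiny_gold; infer_instance

def pvWitness_search_shiny_gold : List String × (List (String × List String)) × String :=
  (["red"], [("muted yellow", ["shiny gold"])], "muted yellow")

def Spec_search_shiny_gold (visited : List String) (graph : List (String × List String)) (bag : String) (out : Bool) : Prop := out = search_shiny_gold_alt visited graph bag
instance (visited : List String) (graph : List (String × List String)) (bag : String) (out : Bool) : Decidable (Spec_search_shiny_gold visited graph bag out) := by unfold Spec_search_shiny_gold; infer_instance

-- ===== CLAIM (what is proved, stated in full; the proofs are below) =====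
def Claim_equal_search_shiny_gold : Prop := ∀ (visited : List String) (graph : List (String × List String)) (bag : String), Dom_search_shiny_gold visited graph bag → Pre_search_shiny_gold visited graph bag → Spec_search_shiny_gold visited graph bag (search_shiny_gold visited graph bag)

-- ===== LEMMAS AND PROOFS =====

theorem pvContainsAdd (v : List String) (x y : String) (h : v.contains y = true) :
    (PySem.Set.add v x).contains y = true := by
  simp only [PySem.Set.add]
  split <;> simp_all

theorem pvFilterLenMono {α : Type} {p q : α → Bool} (h : ∀ a, q a = true → p a = true) :
    ∀ l : List α, (l.filter q).length ≤ (l.filter p).length := by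
  intro l
  induction l with
  | nil => simp
  | cons a t ih =>
    by_cases hq : q a = true
    · simp [List.filter, hq, h a hq]
      omega
    · simp only [Bool.not_eq_true] at hq
      cases hp : p a <;> simp [List.filter, hq, hp] <;> omega

theorem pvM_mono (graph : List (String × List String)) (v v' : List String)
    (h : ∀ y, v.contains y = true → v'.contains y = true) : pvM graph v' ≤ pvM graph v := by
  apply pvFilterLenMono
  intro a ha
  simp only [Bool.not_eq_true'] at ha ⊢
  cases hva : v.contains a
  · rfl
  · rw [h a hva] at ha
    simp at ha

theorem pvM_add_le (graph : List (String × List String)) (v : List String) (x : String) :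
    pvM graph (PySem.Set.add v x) ≤ pvM graph v :=
  pvM_mono graph v _ (fun y hy => pvContainsAdd v x y hy)

-- A's recursion only ever ADDS to visited
theorem pvMonoAll (graph : List (String × List String)) :
    ∀ fuel : Nat,
      (∀ v bag x, v.contains x = true → ((pvSearchA graph fuel v bag).2).contains x = true) ∧
      (∀ cs v x, v.contains x = true → ((pvAnyA graph fuel v cs).2).contains x = true) := by
  intro fuel
  induction fuel with
  | zero =>
    have hs : ∀ v bag x, v.contains x = true → ((pvSearchA graph 0 v bag).2).contains x = true := by
      intro v bag x hx
      rw [pvSearchA]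
      split
      · exact hx
      · cases hl : pvLookup graph bag
        ·
          exact pvContainsAdd v bag x hx
        · dsimp only
          split_ifs
          · exact pvContainsAdd v bag x hx
          · exact pvContainsAdd v bag x hx
          · exact pvContainsAdd v bag x hx
    refine ⟨hs, ?_⟩
    intro cs
    induction cs with
    | nil => intro v x hx; rw [pvAnyA]; exact hx
    | cons c cs ih =>
      intro v x hx
      rw [pvAnyA]
      split
      · exact hs v c x hx
      · exact ih _ x (hs v c x hx)
  | succ f ihf =>
    have hs : ∀ v bag x, v.contains x = true → ((pvSearchA graph (f + 1) v bag).2).contains x = true := by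
      intro v bag x hx
      rw [pvSearchA]
      split
      · exact hx
      · cases hl : pvLookup graph bag
        ·
          exact pvContainsAdd v bag x hx
        · dsimp only
          split_ifs
          · exact pvContainsAdd v bag x hx
          · exact pvContainsAdd v bag x hx
          · exact ihf.2 _ _ x (pvContainsAdd v bag x hx)
    refine ⟨hs, ?_⟩
    intro cs
    induction cs with
    | nil => intro v x hx; rw [pvAnyA]; exact hx
    | cons c cs ih =>
      intro v x hx
      rw [pvAnyA]
      split
      · exact hs v c x hx
      · exact ih _ x (hs v c x hx)

-- B's stack loop simulates A's lazy any() over a frame of pending children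
theorem pvMain (graph : List (String × List String)) :
    ∀ (fuel : Nat) (cs : List String) (v rest : List String), pvM graph v < fuel →
      pvLoopB graph v (cs ++ rest) =
        (if (pvAnyA graph fuel v cs).1 then true else pvLoopB graph (pvAnyA graph fuel v cs).2 rest) := by
  intro fuel
  induction fuel with
  | zero => intro cs v rest h; omega
  | succ f ihf =>
    intro cs
    induction cs with
    | nil =>
      intro v rest h
      rw [pvAnyA]
      simp
    | cons c cs ihc =>
      intro v rest h
      rw [pvAnyA]
      rw [List.cons_append, pvLoopB]
      by_cases hc : v.contains c = true
      · -- child already visited: A returns False for it, B skips the popped node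
        have hS : pvSearchA graph (f + 1) v c = (false, v) := by
          rw [pvSearchA]; simp [show c ∈ v by simpa using hc]
        rw [dif_pos hc]
        simp only [hS, Bool.false_eq_true, if_false]
        exact ihc v rest h
      · have hc' : v.contains c = false := by simpa using hc
        rw [dif_neg hc]
        cases hl : pvLookup graph c with
        | none =>
          have hS : pvSearchA graph (f + 1) v c = (false, PySem.Set.add v c) := by
            rw [pvSearchA]; simp [show c ∉ v by simpa using hc', hl]
          simp only [hS, Bool.false_eq_true, if_false]
          exact ihc _ rest (lt_of_le_of_lt (pvM_add_le graph v c) h)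
        | some l =>
          have hcm : c ∉ v := by simpa using hc'
          by_cases hsg : l.contains "shiny gold" = true
          · have hS : pvSearchA graph (f + 1) v c = (true, PySem.Set.add v c) := by
              rw [pvSearchA]; simp [hcm, hl, show "shiny gold" ∈ l by simpa using hsg]
            show (if l.contains "shiny gold" = true then true
                  else if l.contains "no other" = true then pvLoopB graph (PySem.Set.add v c) (cs ++ rest)
                  else pvLoopB graph (PySem.Set.add v c) (l ++ (cs ++ rest))) = _
            rw [if_pos hsg]
            simp [hS]
          · have hsg' : l.contains "shiny gold" = false := by simpa using hsg
            have hmlt : pvM graph (PySem.Set.add v c) < pvM graph v :=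
              pvM_add_lt_of_some graph v c l hl hc'
            by_cases hno : l.contains "no other" = true
            · have hS : pvSearchA graph (f + 1) v c = (false, PySem.Set.add v c) := by
                rw [pvSearchA]
                simp [hcm, hl, show "shiny gold" ∉ l by simpa using hsg',
                      show "no other" ∈ l by simpa using hno]
              show (if l.contains "shiny gold" = true then true
                    else if l.contains "no other" = true then pvLoopB graph (PySem.Set.add v c) (cs ++ rest)
                    else pvLoopB graph (PySem.Set.add v c) (l ++ (cs ++ rest))) = _
              rw [if_neg (by simpa using hsg'), if_pos hno]
              simp only [hS, Bool.false_eq_true, if_false]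
              exact ihc _ rest (lt_trans hmlt h)
            · have hno' : l.contains "no other" = false := by simpa using hno
              have hS : pvSearchA graph (f + 1) v c = pvAnyA graph f (PySem.Set.add v c) l := by
                rw [pvSearchA]
                simp [hcm, hl, show "shiny gold" ∉ l by simpa using hsg',
                      show "no other" ∉ l by simpa using hno']
              show (if l.contains "shiny gold" = true then true
                    else if l.contains "no other" = true then pvLoopB graph (PySem.Set.add v c) (cs ++ rest)
                    else pvLoopB graph (PySem.Set.add v c) (l ++ (cs ++ rest))) = _
              rw [if_neg (by simpa using hsg'), if_neg (by simpa using hno')]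
              simp only [hS]
              -- B pushed the children: its stack is now l ++ (cs ++ rest)
              have step := ihf l (PySem.Set.add v c) (cs ++ rest) (by omega)
              rw [step]
              by_cases hr : (pvAnyA graph f (PySem.Set.add v c) l).1 = true
              · simp only [hr, if_true]
              · have hr' : (pvAnyA graph f (PySem.Set.add v c) l).1 = false := by simpa using hr
                simp only [hr', Bool.false_eq_true, if_false]
                -- the frame's any() returned False with visited grown; continue with cs
                have hm2 : pvM graph ((pvAnyA graph f (PySem.Set.add v c) l).2) < f + 1 := by
                  have := pvM_mono graph (PySem.Set.add v c) _
                    (fun y hy => (pvMonoAll graph f).2 l _ y hy)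
                  omega
                exact ihc _ rest hm2

theorem pvTop (visited : List String) (graph : List (String × List String)) (bag : String) :
    search_shiny_gold visited graph bag = search_shiny_gold_alt visited graph bag := by
  unfold search_shiny_gold search_shiny_gold_alt
  have hm : pvM graph visited < graph.length + 1 := by
    have h1 : pvM graph visited ≤ (graph.map Prod.fst).length := List.length_filter_le _ _
    simp only [List.length_map] at h1
    omega
  have main := pvMain graph (graph.length + 1) [bag] visited [] hm
  simp only [List.append_nil] at main
  rw [main]
  cases hr : (pvSearchA graph (graph.length + 1) visited bag).1 <;>
    simp [pvAnyA, pvLoopB, hr]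

-- ===== VERDICT (by name: the statement is the Claim_ definition above) =====
theorem search_shiny_gold_spec : Claim_equal_search_shiny_gold := by
  intro visited graph bag _ _
  unfold Spec_search_shiny_gold
  exact pvTop visited graph bag
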